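-- pv_equiv track=rewrite | github.com/HenriqueCSJ/ORCAParser | orca_parser/modules/geom_opt.py | _parse_opt_setup
-- ===== SOURCE A (Python) =====
-- from typing import Any, Callable, Dict, List, Optional
--
-- def _parse_opt_setup(lines: list[str]) -> Dict[str, Dict[str, str]]:
--     """Parse the 'Geometry optimization settings' and 'Convergence Tolerances' blocks."""
--     settings: Dict[str, str] = {}
--     tolerances: Dict[str, str] = {}
--     mode: Optional[str] = None
--
--     for ln in lines:
--         stripped = ln.strip()
--         low = stripped.lower()
--         if low == "geometry optimization settings:":
--             mode = "settings"
--             continue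
--         if low == "convergence tolerances:":
--             mode = "tolerances"
--             continue
--         if mode is None:
--             continue
--         if not stripped:
--             mode = None
--             continue
--         if "...." not in ln:
--             continue
--
--         left, right = ln.split("....", 1)
--         key = left.strip()
--         value = right.strip()
--         if mode == "settings":
--             settings[key] = value
--         else:
--             tolerances[key] = value
--
--     result: Dict[str, Dict[str, str]] = {}
--     if settings:
--         result["settings"] = settings
--     if tolerances:
--         result["tolerances"] = tolerances
--     return result
-- ===== SOURCE B (Python) =====
-- def _header_name(line):
--     low = line.strip().lower()
--     if low == "geometry optimization settings:":
--         return "settings"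
--     if low == "convergence tolerances:":
--         return "tolerances"
--     return None
--
--
-- def _block(tail):
--     """The lines of a block: everything up to a blank line or the next header."""
--     block = []
--     for ln in tail:
--         if not ln.strip() or _header_name(ln) is not None:
--             break
--         block.append(ln)
--     return block
--
--
-- def _parse_opt_setup(lines):
--     """Find the positions of the recognized header lines first, then walk each
--     header's block (up to a blank line or another header) collecting '....' pairs."""
--     settings = {}
--     tolerances = {}
--     headers = [(i, name) for i, ln in enumerate(lines)
--                if (name := _header_name(ln)) is not None]
--     for i, name in headers:
--         target = settings if name == "settings" else tolerances
--         for ln in _block(lines[i + 1:]):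
--             if "...." in ln:
--                 left, right = ln.split("....", 1)
--                 target[left.strip()] = right.strip()
--     result = {}
--     if settings:
--         result["settings"] = settings
--     if tolerances:
--         result["tolerances"] = tolerances
--     return result
-- ===== Notes on version B (the rewrite author's own statement) =====
-- stated objective: alternative
-- what changed: A's single pass with a mode flag is replaced by a find-then-consume decomposition: B first lists the positions of the recognized header lines (one comprehension over enumerate), then for each header walks only its block (up to a blank line or the next header) collecting the '....' key/value pairs.
import Mathlib
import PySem

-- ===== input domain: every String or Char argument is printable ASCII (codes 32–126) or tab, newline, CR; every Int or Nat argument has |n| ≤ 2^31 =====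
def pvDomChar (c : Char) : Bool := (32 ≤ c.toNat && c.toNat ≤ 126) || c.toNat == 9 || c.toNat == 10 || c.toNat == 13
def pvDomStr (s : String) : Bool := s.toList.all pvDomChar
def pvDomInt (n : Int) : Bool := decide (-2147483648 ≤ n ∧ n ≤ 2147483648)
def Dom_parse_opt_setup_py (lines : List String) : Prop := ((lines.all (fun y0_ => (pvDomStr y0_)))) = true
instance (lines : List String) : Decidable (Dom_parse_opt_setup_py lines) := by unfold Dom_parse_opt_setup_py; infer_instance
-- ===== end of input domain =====

-- B replaces A's flat single-pass mode-flag loop by a find-the-headers-then-consume-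
-- each-block decomposition (objective: alternative decomposition, same cost).

-- ===== PORT A =====
-- one loop iteration of A: state = (settings, tolerances, mode); the branches are
-- A's in order ('continue' = return the state, mode unchanged)
def paStep : PySem.Dict String String × PySem.Dict String String × Option String → String →
    PySem.Dict String String × PySem.Dict String String × Option String
  | (settings, tolerances, mode), ln =>
    if PySem.Str.lower (PySem.Str.strip ln) = "geometry optimization settings:" then
      (settings, tolerances, some "settings")
    else if PySem.Str.lower (PySem.Str.strip ln) = "convergence tolerances:" then
      (settings, tolerances, some "tolerances")
    else if mode.isNone then (settings, tolerances, mode)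
    else if PySem.Str.strip ln = "" then (settings, tolerances, none)
    else if PySem.Str.isIn "...." ln = false then (settings, tolerances, mode)
    else
      -- left, right = ln.split("....", 1): exactly two parts since "...." in ln
      let parts := (PySem.Str.splitMax? ln "...." 1).getD []
      let key := PySem.Str.strip (parts.getD 0 "")
      let value := PySem.Str.strip (parts.getD 1 "")
      if mode = some "settings" then (settings.insert key value, tolerances, mode)
      else (settings, tolerances.insert key value, mode)

def parse_opt_setup_py (lines : List String) : List (String × List (String × String)) :=
  let st := lines.foldl paStep (PySem.Dict.empty, PySem.Dict.empty, none)
  let settings := st.1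
  let tolerances := st.2.1
  let result : PySem.Dict String (List (String × String)) := PySem.Dict.empty
  let result := if settings.items = [] then result else result.insert "settings" settings.items
  let result := if tolerances.items = [] then result else result.insert "tolerances" tolerances.items
  result.items

-- ===== PORT B =====
def pvHeaderName (line : String) : Option String :=
  if PySem.Str.lower (PySem.Str.strip line) = "geometry optimization settings:" then some "settings"
  else if PySem.Str.lower (PySem.Str.strip line) = "convergence tolerances:" then some "tolerances"
  else none

-- _block: the lines of a block — everything up to a blank line or the next header
def pvBlock : List String → List String
  | [] => []
  | ln :: rs =>
    if PySem.Str.strip ln = "" ∨ (pvHeaderName ln).isSome then []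
    else ln :: pvBlock rs

-- body of B's inner for-loop over a block's lines
def pvAddLine (name : String) (st : PySem.Dict String String × PySem.Dict String String)
    (ln : String) : PySem.Dict String String × PySem.Dict String String :=
  if PySem.Str.isIn "...." ln then
    let parts := (PySem.Str.splitMax? ln "...." 1).getD []
    let key := PySem.Str.strip (parts.getD 0 "")
    let value := PySem.Str.strip (parts.getD 1 "")
    if name = "settings" then (st.1.insert key value, st.2) else (st.1, st.2.insert key value)
  else st

-- filter of the header list comprehension
def pvHf (p : Int × String) : Option (Int × String) :=
  (pvHeaderName p.2).map (fun nm => (p.1, nm))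

-- headers = [(i, name) for i, ln in enumerate(lines) if (name := _header_name(ln)) is not None]
def pvHdrs (lines : List String) : List (Int × String) :=
  (PySem.List.enumerate lines).filterMap pvHf

-- B's outer for-loop over the header positions (lines[i+1:] is the Python slice)
def pvFoldHdr (base : List String) (hdrs : List (Int × String))
    (st : PySem.Dict String String × PySem.Dict String String) :
    PySem.Dict String String × PySem.Dict String String :=
  hdrs.foldl
    (fun st q => (pvBlock (PySem.List.slice base (some (q.1 + 1)) none)).foldl (pvAddLine q.2) st)
    st

def parse_opt_setup_py_alt (lines : List String) : List (String × List (String × String)) :=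
  let p := pvFoldHdr lines (pvHdrs lines) (PySem.Dict.empty, PySem.Dict.empty)
  let settings := p.1
  let tolerances := p.2
  let result : PySem.Dict String (List (String × String)) := PySem.Dict.empty
  let result := if settings.items = [] then result else result.insert "settings" settings.items
  let result := if tolerances.items = [] then result else result.insert "tolerances" tolerances.items
  result.items

-- ===== PRECONDITION & SPEC =====
def Spec_parse_opt_setup_py (lines : List String) (out : List (String × List (String × String))) : Prop := out = parse_opt_setup_py_alt lines
instance (lines : List String) (out : List (String × List (String × String))) : Decidable (Spec_parse_opt_setup_py lines out) := by unfold Spec_parse_opt_setup_py; infer_instance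

-- ===== CLAIM (what is proved, stated in full; the proofs are below) =====
def Claim_equal_parse_opt_setup_py : Prop := ∀ (lines : List String), Dom_parse_opt_setup_py lines → Spec_parse_opt_setup_py lines (parse_opt_setup_py lines)

-- ===== LEMMAS AND PROOFS =====

theorem pvHeaderName_none_facts (ln : String) (hh : pvHeaderName ln = none) :
    ¬ PySem.Str.lower (PySem.Str.strip ln) = "geometry optimization settings:" ∧
    ¬ PySem.Str.lower (PySem.Str.strip ln) = "convergence tolerances:" := by
  unfold pvHeaderName at hh
  by_cases h1 : PySem.Str.lower (PySem.Str.strip ln) = "geometry optimization settings:"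
  · rw [if_pos h1] at hh; cases hh
  · by_cases h2 : PySem.Str.lower (PySem.Str.strip ln) = "convergence tolerances:"
    · rw [if_neg h1, if_pos h2] at hh; cases hh
    · exact ⟨h1, h2⟩

theorem paStep_hdr (s t : PySem.Dict String String) (mode : Option String) (ln nm : String)
    (hh : pvHeaderName ln = some nm) : paStep (s, t, mode) ln = (s, t, some nm) := by
  by_cases h1 : PySem.Str.lower (PySem.Str.strip ln) = "geometry optimization settings:"
  · have hcomp : pvHeaderName ln = some "settings" := by
      unfold pvHeaderName; rw [if_pos h1]
    calc paStep (s, t, mode) ln = (s, t, some "settings") := by simp only [paStep, h1, if_pos]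
      _ = (s, t, pvHeaderName ln) := by rw [hcomp]
      _ = (s, t, some nm) := by rw [hh]
  · by_cases h2 : PySem.Str.lower (PySem.Str.strip ln) = "convergence tolerances:"
    · have hcomp : pvHeaderName ln = some "tolerances" := by
        unfold pvHeaderName; rw [if_neg h1, if_pos h2]
      calc paStep (s, t, mode) ln = (s, t, some "tolerances") := by simp [paStep, h2]
        _ = (s, t, pvHeaderName ln) := by rw [hcomp]
        _ = (s, t, some nm) := by rw [hh]
    · have hcomp : pvHeaderName ln = none := by
        unfold pvHeaderName; rw [if_neg h1, if_neg h2]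
      rw [hcomp] at hh; cases hh

theorem paStep_none (s t : PySem.Dict String String) (ln : String)
    (hh : pvHeaderName ln = none) : paStep (s, t, none) ln = (s, t, none) := by
  obtain ⟨h1, h2⟩ := pvHeaderName_none_facts ln hh
  simp [paStep, h1, h2]

theorem paStep_blank (s t : PySem.Dict String String) (name ln : String)
    (hh : pvHeaderName ln = none) (hstr : PySem.Str.strip ln = "") :
    paStep (s, t, some name) ln = (s, t, none) := by
  obtain ⟨h1, h2⟩ := pvHeaderName_none_facts ln hh
  simp [paStep, hstr, show PySem.Str.lower "" = "" from by decide]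

theorem paStep_skip (s t : PySem.Dict String String) (name ln : String)
    (hh : pvHeaderName ln = none) (hstr : ¬ PySem.Str.strip ln = "")
    (hin : PySem.Str.isIn "...." ln = false) :
    paStep (s, t, some name) ln = (s, t, some name) := by
  obtain ⟨h1, h2⟩ := pvHeaderName_none_facts ln hh
  simp at hin
  simp [paStep, h1, h2, hstr, hin]

theorem paStep_data (s t : PySem.Dict String String) (name ln : String)
    (hh : pvHeaderName ln = none) (hstr : ¬ PySem.Str.strip ln = "")
    (hin : PySem.Str.isIn "...." ln = true) :
    paStep (s, t, some name) ln =
      (if name = "settings" then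
        (s.insert (PySem.Str.strip (((PySem.Str.splitMax? ln "...." 1).getD []).getD 0 ""))
          (PySem.Str.strip (((PySem.Str.splitMax? ln "...." 1).getD []).getD 1 "")), t, some name)
      else
        (s, t.insert (PySem.Str.strip (((PySem.Str.splitMax? ln "...." 1).getD []).getD 0 ""))
          (PySem.Str.strip (((PySem.Str.splitMax? ln "...." 1).getD []).getD 1 "")), some name)) := by
  obtain ⟨h1, h2⟩ := pvHeaderName_none_facts ln hh
  simp at hin
  simp [paStep, h1, h2, hstr, hin]

theorem pvHf_none (i : Int) (ln : String) (hh : pvHeaderName ln = none) :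
    pvHf (i, ln) = none := by
  unfold pvHf; rw [hh]; rfl

theorem pvHf_some (i : Int) (ln nm : String) (hh : pvHeaderName ln = some nm) :
    pvHf (i, ln) = some (i, nm) := by
  unfold pvHf; rw [hh]; rfl

theorem pvHdrsFrom_shift (xs : List String) : ∀ (s : Int),
    (PySem.List.enumerate xs (s + 1)).filterMap pvHf =
      ((PySem.List.enumerate xs s).filterMap pvHf).map (fun q => (q.1 + 1, q.2)) := by
  induction xs with
  | nil => intro s; rw [PySem.List.enumerate_nil, PySem.List.enumerate_nil]; rfl
  | cons x xs ih =>
    intro s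
    rw [PySem.List.enumerate_cons, PySem.List.enumerate_cons]
    cases h : pvHeaderName x with
    | none =>
      rw [List.filterMap_cons_none (pvHf_none (s + 1) x h),
        List.filterMap_cons_none (pvHf_none s x h)]
      exact ih (s + 1)
    | some nm =>
      rw [List.filterMap_cons_some (pvHf_some (s + 1) x nm h),
        List.filterMap_cons_some (pvHf_some s x nm h), List.map_cons, ih (s + 1)]

theorem pvHdrsFrom_nonneg (xs : List String) : ∀ (s : Int), 0 ≤ s →
    ∀ p ∈ (PySem.List.enumerate xs s).filterMap pvHf, 0 ≤ p.1 := by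
  induction xs with
  | nil => intro s _ p hp; rw [PySem.List.enumerate_nil] at hp; cases hp
  | cons x xs ih =>
    intro s hs p hp
    rw [PySem.List.enumerate_cons] at hp
    cases h : pvHeaderName x with
    | none =>
      rw [List.filterMap_cons_none (pvHf_none s x h)] at hp
      exact ih (s + 1) (by omega) p hp
    | some nm =>
      rw [List.filterMap_cons_some (pvHf_some s x nm h)] at hp
      rcases List.mem_cons.mp hp with h' | h'
      · subst h'; exact hs
      · exact ih (s + 1) (by omega) p h'

theorem pvHdrs_nonneg (rs : List String) : ∀ p ∈ pvHdrs rs, 0 ≤ p.1 :=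
  pvHdrsFrom_nonneg rs 0 le_rfl

theorem pvHdrs_cons_none (ln : String) (rs : List String) (hh : pvHeaderName ln = none) :
    pvHdrs (ln :: rs) = (pvHdrs rs).map (fun q => (q.1 + 1, q.2)) := by
  unfold pvHdrs
  rw [PySem.List.enumerate_cons, List.filterMap_cons_none (pvHf_none 0 ln hh)]
  exact pvHdrsFrom_shift rs 0

theorem pvHdrs_cons_some (ln : String) (rs : List String) (nm : String)
    (hh : pvHeaderName ln = some nm) :
    pvHdrs (ln :: rs) = ((0 : Int), nm) :: (pvHdrs rs).map (fun q => (q.1 + 1, q.2)) := by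
  unfold pvHdrs
  rw [PySem.List.enumerate_cons, List.filterMap_cons_some (pvHf_some 0 ln nm hh)]
  rw [pvHdrsFrom_shift rs 0]

theorem pvFoldHdr_cons (base : List String) (i : Int) (nm : String)
    (H : List (Int × String)) (st : PySem.Dict String String × PySem.Dict String String) :
    pvFoldHdr base ((i, nm) :: H) st =
      pvFoldHdr base H
        ((pvBlock (PySem.List.slice base (some (i + 1)) none)).foldl (pvAddLine nm) st) := by
  unfold pvFoldHdr
  rw [List.foldl_cons]

theorem pvSlice_cons (x : String) (xs : List String) (i : Int) (hi : 0 ≤ i) :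
    PySem.List.slice (x :: xs) (some (i + 1)) none = PySem.List.slice xs (some i) none := by
  rw [PySem.List.slice_from (x :: xs) (show (0 : Int) ≤ i + 1 by omega),
    PySem.List.slice_from xs hi, show (i + 1).toNat = i.toNat + 1 by omega]
  rfl

theorem pvSlice_one (x : String) (xs : List String) :
    PySem.List.slice (x :: xs) (some ((0 : Int) + 1)) none = xs := by
  rw [PySem.List.slice_from (x :: xs) (show (0 : Int) ≤ 0 + 1 by omega),
    show ((0 : Int) + 1).toNat = 1 by omega]
  rfl

theorem pvFoldHdr_shift (ln : String) (base : List String) (H : List (Int × String))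
    (hH : ∀ p ∈ H, 0 ≤ p.1) :
    ∀ (st : PySem.Dict String String × PySem.Dict String String),
      pvFoldHdr (ln :: base) (H.map (fun q => (q.1 + 1, q.2))) st = pvFoldHdr base H st := by
  induction H with
  | nil => intro st; rfl
  | cons q H ih =>
    obtain ⟨qi, qn⟩ := q
    intro st
    have hq : (0 : Int) ≤ qi := hH (qi, qn) List.mem_cons_self
    rw [List.map_cons]
    rw [pvFoldHdr_cons, pvSlice_cons ln base (qi + 1) (by omega), pvFoldHdr_cons]
    exact ih (fun p hp => hH p (List.mem_cons_of_mem _ hp)) _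

theorem pv_main (ls : List String) : ∀ (s t : PySem.Dict String String),
    (((ls.foldl paStep (s, t, (none : Option String))).1,
      (ls.foldl paStep (s, t, (none : Option String))).2.1) =
        pvFoldHdr ls (pvHdrs ls) (s, t)) ∧
    (∀ (name : String),
      ((ls.foldl paStep (s, t, some name)).1,
       (ls.foldl paStep (s, t, some name)).2.1) =
        pvFoldHdr ls (pvHdrs ls) ((pvBlock ls).foldl (pvAddLine name) (s, t))) := by
  induction ls with
  | nil =>
    intro s t
    exact ⟨rfl, fun name => rfl⟩
  | cons ln rs ih =>
    intro s t
    cases hh : pvHeaderName ln with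
    | some nm =>
      -- ln is a header line: both modes switch to nm; any current block ends here
      have hblock : pvBlock (ln :: rs) = [] := by
        show (if PySem.Str.strip ln = "" ∨ (pvHeaderName ln).isSome = true then []
          else ln :: pvBlock rs) = []
        rw [if_pos (Or.inr (by rw [hh]; rfl))]
      have hfold : ∀ (st : PySem.Dict String String × PySem.Dict String String),
          pvFoldHdr (ln :: rs) (pvHdrs (ln :: rs)) st =
            pvFoldHdr rs (pvHdrs rs) ((pvBlock rs).foldl (pvAddLine nm) st) := by
        intro st
        rw [pvHdrs_cons_some ln rs nm hh, pvFoldHdr_cons, pvSlice_one]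
        exact pvFoldHdr_shift ln rs (pvHdrs rs) (pvHdrs_nonneg rs) _
      refine ⟨?_, fun name => ?_⟩
      · rw [List.foldl_cons, paStep_hdr s t none ln nm hh, hfold]
        exact (ih s t).2 nm
      · rw [List.foldl_cons, paStep_hdr s t (some name) ln nm hh, hblock, List.foldl_nil, hfold]
        exact (ih s t).2 nm
    | none =>
      have hfold : ∀ (st : PySem.Dict String String × PySem.Dict String String),
          pvFoldHdr (ln :: rs) (pvHdrs (ln :: rs)) st = pvFoldHdr rs (pvHdrs rs) st := by
        intro st
        rw [pvHdrs_cons_none ln rs hh]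
        exact pvFoldHdr_shift ln rs (pvHdrs rs) (pvHdrs_nonneg rs) st
      refine ⟨?_, fun name => ?_⟩
      · rw [List.foldl_cons, paStep_none s t ln hh, hfold]
        exact (ih s t).1
      · by_cases hstr : PySem.Str.strip ln = ""
        · -- a blank line ends the block
          have hblock : pvBlock (ln :: rs) = [] := by
            show (if PySem.Str.strip ln = "" ∨ (pvHeaderName ln).isSome = true then []
              else ln :: pvBlock rs) = []
            rw [if_pos (Or.inl hstr)]
          rw [List.foldl_cons, paStep_blank s t name ln hh hstr, hblock, List.foldl_nil, hfold]
          exact (ih s t).1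
        · have hblock : pvBlock (ln :: rs) = ln :: pvBlock rs := by
            show (if PySem.Str.strip ln = "" ∨ (pvHeaderName ln).isSome = true then []
              else ln :: pvBlock rs) = ln :: pvBlock rs
            rw [if_neg]
            rintro (h | h)
            · exact hstr h
            · rw [hh] at h; cases h
          cases hin : PySem.Str.isIn "...." ln with
          | false =>
            -- a line without '....' inside a block: skipped by both
            have haddl : pvAddLine name (s, t) ln = (s, t) := by
              unfold pvAddLine
              rw [if_neg (show ¬ PySem.Str.isIn "...." ln = true by
                rw [hin]; exact fun hcon => Bool.noConfusion hcon)]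
            rw [List.foldl_cons, paStep_skip s t name ln hh hstr hin, hblock, List.foldl_cons,
              haddl, hfold]
            exact (ih s t).2 name
          | true =>
            -- a '....' data line: both insert the same pair into the same dict
            have haddl : pvAddLine name (s, t) ln =
                (if name = "settings" then
                  (s.insert (PySem.Str.strip (((PySem.Str.splitMax? ln "...." 1).getD []).getD 0 ""))
                    (PySem.Str.strip (((PySem.Str.splitMax? ln "...." 1).getD []).getD 1 "")), t)
                else
                  (s, t.insert (PySem.Str.strip (((PySem.Str.splitMax? ln "...." 1).getD []).getD 0 ""))
                    (PySem.Str.strip (((PySem.Str.splitMax? ln "...." 1).getD []).getD 1 "")))) := by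
              unfold pvAddLine
              rw [if_pos hin]
            rw [List.foldl_cons, paStep_data s t name ln hh hstr hin, hblock, List.foldl_cons,
              haddl, hfold]
            by_cases hn : name = "settings"
            · rw [if_pos hn, if_pos hn]
              exact (ih _ t).2 name
            · rw [if_neg hn, if_neg hn]
              exact (ih s _).2 name

-- ===== VERDICT (by name: the statement is the Claim_ definition above) =====
theorem parse_opt_setup_py_spec : Claim_equal_parse_opt_setup_py := by
  intro lines _
  unfold Spec_parse_opt_setup_py
  have h := (pv_main lines PySem.Dict.empty PySem.Dict.empty).1
  have h1 : (lines.foldl paStep (PySem.Dict.empty, PySem.Dict.empty, (none : Option String))).1 =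
      (pvFoldHdr lines (pvHdrs lines) (PySem.Dict.empty, PySem.Dict.empty)).1 := by
    rw [← h]
  have h2 : (lines.foldl paStep (PySem.Dict.empty, PySem.Dict.empty, (none : Option String))).2.1 =
      (pvFoldHdr lines (pvHdrs lines) (PySem.Dict.empty, PySem.Dict.empty)).2 := by
    rw [← h]
  simp only [parse_opt_setup_py, parse_opt_setup_py_alt]
  rw [h1, h2]
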